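-- pv_equiv track=rewrite | github.com/majbc1999/aoc-2023 | day-02/cube_conondrum.py | max_number_of_each_color
-- ===== SOURCE A (Python) =====
-- from typing import List, Dict, Tuple
--
-- def max_number_of_each_color(game: List[Tuple[str, int]]) -> Dict[str, int]:
--     """
--     Game here is represented as list of (color, number of balls).
--     """
--     values = {}
--
--     for color, n in game:
--         if color not in values.keys():
--             values[color] = n
--
--         else:
--             values[color] = max(values[color], n)
--
--     return values
-- ===== SOURCE B (Python) =====
-- def max_number_of_each_color(game):
--     """
--     Two-phase: first group all counts by color (first-appearance order),
--     then reduce each group with max.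
--     """
--     groups = {}
--     for color, n in game:
--         groups.setdefault(color, []).append(n)
--     return {color: max(ns) for color, ns in groups.items()}
-- ===== Notes on version B (the rewrite author's own statement) =====
-- stated objective: alternative
-- what changed: Replaces A's in-loop running-max accumulator with a two-phase structure: one pass groups every count into a per-color list, a separate pass reduces each group with max.
import Mathlib
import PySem

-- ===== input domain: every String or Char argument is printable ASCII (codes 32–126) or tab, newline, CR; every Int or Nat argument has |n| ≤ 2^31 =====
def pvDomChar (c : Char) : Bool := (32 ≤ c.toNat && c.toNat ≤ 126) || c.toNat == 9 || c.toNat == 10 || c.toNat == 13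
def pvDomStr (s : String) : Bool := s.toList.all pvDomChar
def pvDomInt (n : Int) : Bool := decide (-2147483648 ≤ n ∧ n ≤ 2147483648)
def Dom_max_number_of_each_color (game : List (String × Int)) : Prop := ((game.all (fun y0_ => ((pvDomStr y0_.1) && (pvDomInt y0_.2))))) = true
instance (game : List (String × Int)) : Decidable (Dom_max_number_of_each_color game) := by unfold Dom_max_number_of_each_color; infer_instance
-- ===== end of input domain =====

-- B replaces A's in-loop running-max accumulator with a two-phase group-then-reduce
-- structure (objective: alternative); return values proved equal on all inputs.

-- ===== PORT A =====
-- for color, n in game: if color not in values: values[color] = n else values[color] = max(values[color], n)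
def max_number_of_each_color (game : List (String × Int)) : List (String × Int) :=
  (game.foldl (fun values p =>
      if ¬ (values.contains p.1) then values.insert p.1 p.2
      else values.insert p.1 (max (values.getD p.1 0) p.2))
    PySem.Dict.empty).items

-- ===== PORT B =====
-- Python's max(ns) on a nonempty list; the [] case is unreachable in B (groups hold ≥ 1 count).
def pyMaxD (ns : List Int) : Int :=
  match ns with
  | [] => 0
  | h :: t => t.foldl max h

-- groups.setdefault(color, []).append(n) is exactly Dict.modify color [] (· ++ [n])
-- (absent key: insert [] then append → [n]; present: append to the stored list in place).
def max_number_of_each_color_alt (game : List (String × Int)) : List (String × Int) :=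
  let groups := game.foldl (fun d p => d.modify p.1 [] (· ++ [p.2])) PySem.Dict.empty
  groups.items.map (fun p => (p.1, pyMaxD p.2))

-- ===== PRECONDITION & SPEC =====
def Spec_max_number_of_each_color (game : List (String × Int)) (out : List (String × Int)) : Prop := out = max_number_of_each_color_alt game
instance (game : List (String × Int)) (out : List (String × Int)) : Decidable (Spec_max_number_of_each_color game out) := by unfold Spec_max_number_of_each_color; infer_instance

-- ===== CLAIM (what is proved, stated in full; the proofs are below) =====
def Claim_equal_max_number_of_each_color : Prop := ∀ (game : List (String × Int)), Dom_max_number_of_each_color game → Spec_max_number_of_each_color game (max_number_of_each_color game)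

-- ===== LEMMAS AND PROOFS =====

theorem pyMaxD_append (ns : List Int) (n : Int) :
    pyMaxD (ns ++ [n]) = if ns = [] then n else max (pyMaxD ns) n := by
  cases ns with
  | nil => simp [pyMaxD]
  | cons h t => simp [pyMaxD, List.foldl_append]

-- loop invariant: A's running-max dict vs B's grouping dict
theorem loop_inv (game : List (String × Int))
    (dA : PySem.Dict String Int) (dG : PySem.Dict String (List Int))
    (hndA : dA.keys.Nodup) (hndG : dG.keys.Nodup)
    (hk : dA.keys = dG.keys)
    (hv : ∀ c, dA.getD c 0 = pyMaxD (dG.getD c []))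
    (hne : ∀ c, dG.contains c = true → dG.getD c [] ≠ []) :
    (game.foldl (fun values p =>
        if ¬ (values.contains p.1) then values.insert p.1 p.2
        else values.insert p.1 (max (values.getD p.1 0) p.2)) dA).items
      = ((game.foldl (fun d p => d.modify p.1 [] (· ++ [p.2])) dG).items).map
          (fun p => (p.1, pyMaxD p.2)) := by
  induction game generalizing dA dG with
  | nil =>
      simp only [List.foldl_nil]
      rw [PySem.Dict.items_eq_map_keys dA hndA 0,
          PySem.Dict.items_eq_map_keys dG hndG [], List.map_map, hk]
      exact List.map_congr_left (fun c _ => by simp [hv c])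
  | cons p rest ih =>
      obtain ⟨c, n⟩ := p
      simp only [List.foldl_cons]
      have hcontains : dA.contains c = dG.contains c := by
        simp [PySem.Dict.contains_eq_decide_mem_keys, hk]
      -- A's step is an insert at c in both branches
      have hA : (if ¬ (dA.contains c) then dA.insert c n
                 else dA.insert c (max (dA.getD c 0) n))
              = dA.insert c (if dA.contains c then max (dA.getD c 0) n else n) := by
        by_cases h : dA.contains c = true <;> simp [h]
      rw [hA]
      apply ih
      · exact PySem.Dict.nodup_keys_insert dA c _ hndA
      · -- modify keeps keys unique
        have := PySem.Dict.nodup_keys_foldl_modify_key [((c : String), (n : Int))]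
          Prod.fst [] (fun _ p v => v ++ [p.2]) dG hndG
        simpa using this
      · -- keys evolve identically
        rw [PySem.Dict.keys_modify]
        by_cases h : dG.contains c = true
        · rw [PySem.Dict.keys_insert_of_contains _ _ (hcontains ▸ h),
              PySem.Dict.keys_insert_of_contains _ _ h, hk]
        · have h' : dA.contains c = false := by
            rw [hcontains]; exact Bool.eq_false_iff.mpr h
          rw [PySem.Dict.keys_insert_of_not_contains _ _ h',
              PySem.Dict.keys_insert_of_not_contains _ _ (Bool.eq_false_iff.mpr h), hk]
      · intro c'
        rw [PySem.Dict.getD_insert, PySem.Dict.getD_modify]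
        by_cases hc : c' = c
        · rw [if_pos hc, if_pos hc, pyMaxD_append]
          by_cases h : dG.contains c = true
          · rw [if_neg (hne c h), hcontains, if_pos h, hv c]
          · have hg : dG.getD c [] = [] :=
              PySem.Dict.getD_of_not_contains _ _ (Bool.eq_false_iff.mpr h)
            rw [if_pos hg, hcontains, if_neg h]
        · rw [if_neg hc, if_neg hc, hv c']
      · intro c' hc'
        rw [PySem.Dict.getD_modify]
        by_cases hc : c' = c
        · simp [hc]
        · rw [if_neg hc]
          apply hne
          have := PySem.Dict.contains_modify (d := dG) (k := c) (d0 := [])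
            (f := (· ++ [n])) (k' := c')
          simp only [this] at hc'
          simpa [hc] using hc'

-- ===== VERDICT (by name: the statement is the Claim_ definition above) =====
theorem max_number_of_each_color_spec : Claim_equal_max_number_of_each_color := by
  intro game _
  unfold Spec_max_number_of_each_color max_number_of_each_color max_number_of_each_color_alt
  exact loop_inv game PySem.Dict.empty PySem.Dict.empty
    (by simp) (by simp) (by simp)
    (fun c => by simp [pyMaxD, PySem.Dict.getD_empty])
    (fun c h => by simp [PySem.Dict.contains_empty] at h)
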